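-- pv_equiv track=rewrite | github.com/origin1508/algorithm | 프로그래머스/lv1/72410. 신규 아이디 추천/신규 아이디 추천.py | solution
-- ===== SOURCE A (Python) =====
-- def solution(new_id):
--     special_character = ["-", "_", "."]
--     answer = ''
--     new_id = new_id.lower()
--
--     for c in new_id:
--         if 48 <= ord(c) <= 57 or 97 <= ord(c) <= 122 or c in special_character:
--             if answer:
--                 if answer[-1] == "." and c == ".":
--                     continue
--             answer += c
--
--     if answer[0] == ".":
--         answer = answer[1:]
--
--     if len(answer) == 0:
--         answer += "a"
--
--     if answer[-1] == ".":
--         answer = answer[:-1]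
--
--     if len(answer) > 15:
--         answer = answer[:15]
--         if answer[-1] == ".":
--             answer = answer[:14]
--
--     if len(answer) <= 2:
--         while len(answer) != 3:
--             answer += answer[-1]
--
--     return answer
-- ===== SOURCE B (Python) =====
-- def solution(new_id):
--     kept = ''.join(c for c in new_id.lower()
--                    if '0' <= c <= '9' or 'a' <= c <= 'z' or c in '-_.')
--     core = '.'.join(seg for seg in kept.split('.') if seg) or 'a'
--     core = core[:15].rstrip('.')
--     return core.ljust(3, core[-1])
-- ===== Notes on version B (the rewrite author's own statement) =====
-- stated objective: simpler
-- what changed: A builds the id with one stateful character loop (adjacent-dot skip against the accumulator's last char) followed by single-character leading/trailing-dot removals and a while-loop pad; B instead splits the kept characters on '.' and joins the nonempty segments, which collapses dot runs and strips both end dots in one structural operation, then truncates with rstrip and pads with ljust.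
-- outside the precondition, e.g. on solution('!!'): A raises IndexError, B returns 'aaa'
import Mathlib
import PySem

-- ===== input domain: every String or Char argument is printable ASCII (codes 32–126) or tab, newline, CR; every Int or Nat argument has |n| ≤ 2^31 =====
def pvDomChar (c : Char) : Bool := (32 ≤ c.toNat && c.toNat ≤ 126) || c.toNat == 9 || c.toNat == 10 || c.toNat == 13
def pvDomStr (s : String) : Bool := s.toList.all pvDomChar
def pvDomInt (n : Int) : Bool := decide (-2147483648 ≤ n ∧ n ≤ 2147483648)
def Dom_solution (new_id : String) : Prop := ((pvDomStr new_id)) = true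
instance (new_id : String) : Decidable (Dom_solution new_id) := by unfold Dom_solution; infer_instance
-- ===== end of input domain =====

-- B rebuilds the id by splitting the kept characters on '.' and joining the nonempty
-- segments (collapsing and stripping dots at once), instead of A's stateful
-- character-by-character accumulator loop with single-dot fix-ups (objective: simpler).

-- ===== PORT A =====
-- the loop body of A's for-loop (allowed test, adjacent-dot skip, append)
def pvStepA (answer : List Char) (c : Char) : List Char :=
  if (48 ≤ c.toNat ∧ c.toNat ≤ 57) ∨ (97 ≤ c.toNat ∧ c.toNat ≤ 122) ∨ c ∈ (['-', '_', '.'] : List Char) then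
    if answer ≠ [] ∧ answer.getLast? = some '.' ∧ c = '.' then answer  -- 'continue'
    else answer ++ [c]
  else answer

-- Python's `while len(answer) != 3: answer += answer[-1]`; entered only with length ≤ 2,
-- so fuel 3 is exact there; `getLastD ' '` stands for answer[-1], which Python only
-- evaluates on nonempty answer (empty answer is excluded by Pre_ before this point).
def pvPadA (fuel : Nat) (l : List Char) : List Char :=
  match fuel with
  | 0 => l
  | fuel + 1 => if l.length ≠ 3 then pvPadA fuel (l ++ [l.getLastD ' ']) else l

def solution (new_id : String) : String :=
  let s := (PySem.Str.lower new_id).toList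
  let answer := s.foldl pvStepA []
  -- `answer[0]` raises IndexError on empty answer (excluded by Pre_); there this port returns answer unchanged
  let answer := if answer.head? = some '.' then answer.tail else answer
  let answer := if answer.length = 0 then answer ++ ['a'] else answer
  let answer := if answer.getLast? = some '.' then answer.dropLast else answer
  let answer :=
    if 15 < answer.length then
      let answer := answer.take 15
      if answer.getLast? = some '.' then answer.take 14 else answer
    else answer
  let answer := if answer.length ≤ 2 then pvPadA 3 answer else answer
  String.ofList answer

-- ===== PORT B =====
-- kept.split('.') ported by hand, exactly Python's str.split with a one-char separator
-- (split of the empty string is [''], i.e. [[]])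
def pvSplitDot : List Char → List (List Char)
  | [] => [[]]
  | c :: t =>
    match pvSplitDot t with
    | s :: ss => if c = '.' then [] :: s :: ss else (c :: s) :: ss
    | [] => [[c]]   -- unreachable: pvSplitDot never returns []

-- '.'.join(pieces)
def pvJoinDot : List (List Char) → List Char
  | [] => []
  | [s] => s
  | s :: ss => s ++ '.' :: pvJoinDot ss

def solution_alt (new_id : String) : String :=
  let lowered := (PySem.Str.lower new_id).toList
  let kept := lowered.filter (fun c => decide ('0' ≤ c ∧ c ≤ '9') || decide ('a' ≤ c ∧ c ≤ 'z') || decide (c ∈ "-_.".toList))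
  let core := pvJoinDot ((pvSplitDot kept).filter (· ≠ []))   -- '.'.join(seg for seg in kept.split('.') if seg)
  let core := if core = [] then ['a'] else core                -- `or 'a'`
  let core := ((core.take 15).reverse.dropWhile (· == '.')).reverse   -- core[:15].rstrip('.') (rstrip ported by hand, exact)
  -- core.ljust(3, core[-1]); core is never empty here, so Python's core[-1] is getLastD's taken branch
  String.ofList (core ++ List.replicate (3 - core.length) (core.getLastD ' '))

-- ===== PRECONDITION & SPEC =====
-- Pre_ excludes exactly the inputs that contain no digit, no letter and no dash/underscore/dot,
-- on which A's `answer[0]` raises IndexError (B happens to return a value there).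
def Pre_solution (new_id : String) : Prop :=
  ((PySem.Str.lower new_id).toList.any (fun c =>
    decide ((48 ≤ c.toNat ∧ c.toNat ≤ 57) ∨ (97 ≤ c.toNat ∧ c.toNat ≤ 122) ∨ c ∈ (['-', '_', '.'] : List Char)))) = true
instance (new_id : String) : Decidable (Pre_solution new_id) := by unfold Pre_solution; infer_instance

def pvWitness_solution : String := "abc"

def Spec_solution (new_id : String) (out : String) : Prop := out = solution_alt new_id
instance (new_id : String) (out : String) : Decidable (Spec_solution new_id out) := by unfold Spec_solution; infer_instance

-- ===== CLAIM (what is proved, stated in full; the proofs are below) =====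
def Claim_equal_solution : Prop := ∀ (new_id : String), Dom_solution new_id → Pre_solution new_id → Spec_solution new_id (solution new_id)

-- ===== LEMMAS AND PROOFS =====

-- collapse runs of dots; the Bool records whether the previous kept character was a dot
def pvCol : Bool → List Char → List Char
  | _, [] => []
  | b, c :: t => if b = true ∧ c = '.' then pvCol b t else c :: pvCol (c == '.') t

-- drop one trailing dot (A's `if answer[-1] == '.': answer = answer[:-1]`)
def pvRstrip1 (l : List Char) : List Char :=
  if l.getLast? = some '.' then l.dropLast else l

-- join with each segment preceded by a dot
def pvJP (segs : List (List Char)) : List Char := segs.flatMap (fun s => '.' :: s)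

-- join: head segment bare, the rest dot-prefixed
def pvJD : List (List Char) → List Char
  | [] => []
  | s :: ss => s ++ pvJP ss

-- the "no two adjacent dots" relation
def pvR (a b : Char) : Prop := ¬(a = '.' ∧ b = '.')

lemma pvAllowed_eq (c : Char) :
    (decide ('0' ≤ c ∧ c ≤ '9') || decide ('a' ≤ c ∧ c ≤ 'z') || decide (c ∈ "-_.".toList))
      = decide ((48 ≤ c.toNat ∧ c.toNat ≤ 57) ∨ (97 ≤ c.toNat ∧ c.toNat ≤ 122) ∨ c ∈ (['-', '_', '.'] : List Char)) := by
  have e1 : ('0' ≤ c ∧ c ≤ '9') ↔ (48 ≤ c.toNat ∧ c.toNat ≤ 57) := by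
    rw [Char.le_def, Char.le_def, UInt32.le_iff_toNat_le, UInt32.le_iff_toNat_le]; exact Iff.rfl
  have e2 : ('a' ≤ c ∧ c ≤ 'z') ↔ (97 ≤ c.toNat ∧ c.toNat ≤ 122) := by
    rw [Char.le_def, Char.le_def, UInt32.le_iff_toNat_le, UInt32.le_iff_toNat_le]; exact Iff.rfl
  have e3 : "-_.".toList = (['-', '_', '.'] : List Char) := by decide
  simp only [← Bool.decide_or, decide_eq_decide, e1, e2, e3]
  tauto

-- A's fold builds the collapsed keep-list
lemma pvCol_cons_skip (b : Bool) (c : Char) (f : List Char) (h : b = true ∧ c = '.') :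
    pvCol b (c :: f) = pvCol b f := by simp [pvCol, h.1, h.2]

lemma pvCol_cons_keep (b : Bool) (c : Char) (f : List Char) (h : ¬(b = true ∧ c = '.')) :
    pvCol b (c :: f) = c :: pvCol (c == '.') f := by
  simp only [pvCol]; rw [if_neg h]

lemma pvFoldA_eq (s : List Char) : ∀ (acc : List Char),
    s.foldl pvStepA acc = acc ++ pvCol (acc.getLast? == some '.') (s.filter (fun c =>
      decide ((48 ≤ c.toNat ∧ c.toNat ≤ 57) ∨ (97 ≤ c.toNat ∧ c.toNat ≤ 122) ∨ c ∈ (['-', '_', '.'] : List Char)))) := by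
  induction s with
  | nil => intro acc; simp [pvCol]
  | cons c t ih =>
    intro acc
    by_cases hc : (48 ≤ c.toNat ∧ c.toNat ≤ 57) ∨ (97 ≤ c.toNat ∧ c.toNat ≤ 122) ∨ c ∈ (['-', '_', '.'] : List Char)
    · rw [List.foldl_cons, List.filter_cons, if_pos (by simpa using hc)]
      by_cases hskip : acc.getLast? = some '.' ∧ c = '.'
      · have hne : acc ≠ [] := by intro h; rw [h] at hskip; simp at hskip
        rw [show pvStepA acc c = acc from by
          simp only [pvStepA, if_pos hc]; rw [if_pos ⟨hne, hskip.1, hskip.2⟩]]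
        rw [pvCol_cons_skip _ _ _ ⟨by simp [hskip.1], hskip.2⟩]
        exact ih acc
      · have hb : ¬((acc.getLast? == some '.') = true ∧ c = '.') := by
          rintro ⟨h1, h2⟩; exact hskip ⟨by simpa using h1, h2⟩
        rw [show pvStepA acc c = acc ++ [c] from by
          simp only [pvStepA, if_pos hc]
          rw [if_neg (by rintro ⟨h1, h2, h3⟩; exact hskip ⟨h2, h3⟩)]]
        rw [ih (acc ++ [c]), pvCol_cons_keep _ _ _ hb]
        simp
    · rw [List.foldl_cons, List.filter_cons, if_neg (by simpa using hc)]
      rw [show pvStepA acc c = acc from by simp only [pvStepA, if_neg hc]]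
      exact ih acc

lemma pvJoinDot_eq (L : List (List Char)) : pvJoinDot L = pvJD L := by
  induction L with
  | nil => rfl
  | cons s ss ih =>
    cases ss with
    | nil => simp [pvJoinDot, pvJD, pvJP]
    | cons r rs =>
      simp only [pvJoinDot, pvJD] at *
      rw [ih]
      simp [pvJP]

lemma pvSplitDot_ne_nil (l : List Char) : pvSplitDot l ≠ [] := by
  cases l with
  | nil => simp [pvSplitDot]
  | cons c t =>
    simp only [pvSplitDot]
    rcases h : pvSplitDot t with _ | ⟨s, ss⟩ <;> simp
    split <;> simp

-- emptiness of the two sides coincides with "all characters are dots"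
lemma pvCol_true_empty (l : List Char) : (pvCol true l = []) ↔ l.all (· == '.') := by
  induction l with
  | nil => simp [pvCol]
  | cons c t ih =>
    by_cases hc : c = '.'
    · simp [pvCol, hc, ih]
    · simp [pvCol, hc]

lemma pvSplit_filter_empty (l : List Char) :
    ((pvSplitDot l).filter (· ≠ []) = []) ↔ l.all (· == '.') := by
  induction l with
  | nil => simp [pvSplitDot]
  | cons c t ih =>
    simp only [pvSplitDot]
    rcases h : pvSplitDot t with _ | ⟨s, ss⟩
    · exact absurd h (pvSplitDot_ne_nil t)
    · rw [h] at ih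
      by_cases hc : c = '.'
      · simpa [hc] using ih
      · simp [hc]

lemma pvRstrip1_cons (c : Char) (X : List Char) :
    pvRstrip1 (c :: X) = if X = [] then (if c = '.' then [] else [c]) else c :: pvRstrip1 X := by
  cases X with
  | nil => by_cases hc : c = '.' <;> simp [pvRstrip1, hc]
  | cons y ys =>
    simp only [pvRstrip1, List.getLast?_cons_cons, List.dropLast_cons₂]
    split <;> simp

-- KEY: split/filter/join equals collapse with a trailing dot dropped
lemma pvKey (l : List Char) :
    (pvJD ((pvSplitDot l).filter (· ≠ [])) = pvRstrip1 (pvCol true l)) ∧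
    ((pvSplitDot l).head?.getD [] ++ pvJP (((pvSplitDot l).tail).filter (· ≠ []))
      = pvRstrip1 (pvCol false l)) := by
  induction l with
  | nil => constructor <;> simp [pvSplitDot, pvJD, pvJP, pvCol, pvRstrip1]
  | cons c t ih =>
    obtain ⟨ihT, ihF⟩ := ih
    rcases hs : pvSplitDot t with _ | ⟨s, ss⟩
    · exact absurd hs (pvSplitDot_ne_nil t)
    · rw [hs] at ihT ihF
      by_cases hc : c = '.'
      · subst hc
        have hsplit : pvSplitDot ('.' :: t) = [] :: s :: ss := by simp [pvSplitDot, hs]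
        have hcolT : pvCol true ('.' :: t) = pvCol true t := pvCol_cons_skip _ _ _ ⟨rfl, rfl⟩
        have hcolF : pvCol false ('.' :: t) = '.' :: pvCol true t := by
          rw [pvCol_cons_keep _ _ _ (by simp)]; simp
        constructor
        · rw [hsplit, hcolT, ← ihT]
          simp [List.filter_cons]
        · rw [hsplit, hcolF]
          simp only [List.head?_cons, Option.getD_some, List.tail_cons, List.nil_append]
          rw [pvRstrip1_cons]
          have hEmpty : ((s :: ss).filter (· ≠ []) = []) ↔ pvCol true t = [] := by
            rw [← hs, pvSplit_filter_empty, pvCol_true_empty]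
          by_cases hE : pvCol true t = []
          · rw [if_pos hE]
            rw [show ((s :: ss).filter (· ≠ [])) = [] from hEmpty.mpr hE]
            simp [pvJP]
          · rw [if_neg hE, ← ihT]
            have hne : (s :: ss).filter (· ≠ []) ≠ [] := fun h => hE (hEmpty.mp h)
            obtain ⟨u, us, hf⟩ := List.exists_cons_of_ne_nil hne
            rw [hf]
            simp [pvJP, pvJD]
      · have hsplit : pvSplitDot (c :: t) = (c :: s) :: ss := by simp [pvSplitDot, hs, hc]
        have hcc : (c == '.') = false := by simp [hc]
        have hcolT : pvCol true (c :: t) = c :: pvCol false t := by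
          rw [pvCol_cons_keep _ _ _ (by simp [hc]), hcc]
        have hcolF : pvCol false (c :: t) = c :: pvCol false t := by
          rw [pvCol_cons_keep _ _ _ (by simp [hc]), hcc]
        have hstep : pvRstrip1 (c :: pvCol false t) = c :: pvRstrip1 (pvCol false t) := by
          rw [pvRstrip1_cons]
          by_cases hE : pvCol false t = []
          · rw [if_pos hE, if_neg hc, hE]
            simp [pvRstrip1]
          · rw [if_neg hE]
        constructor
        · rw [hsplit, hcolT, hstep, ← ihF]
          simp [pvJD]
        · rw [hsplit, hcolF, hstep, ← ihF]
          simp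

-- chain property of the collapsed list, plus: after a dot the head is not a dot
lemma pvCol_chain (l : List Char) : ∀ b, List.IsChain pvR (pvCol b l) ∧
    (b = true → (pvCol b l).head? ≠ some '.') := by
  induction l with
  | nil => intro b; simp [pvCol]
  | cons c t ih =>
    intro b
    by_cases h : b = true ∧ c = '.'
    · rw [show pvCol b (c :: t) = pvCol b t from by simp [pvCol, h.1, h.2]]
      exact ih b
    · rw [show pvCol b (c :: t) = c :: pvCol (c == '.') t from by simp only [pvCol, if_neg h]]
      refine ⟨(ih (c == '.')).1.cons ?_, ?_⟩
      · intro y hy ⟨hcd, hyd⟩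
        have hh : (pvCol (c == '.') t).head? = some '.' := by
          rw [Option.mem_def] at hy; rw [hy, hyd]
        exact (ih (c == '.')).2 (by simp [hcd]) hh
      · intro hb
        have : ¬ c = '.' := fun hcd => h ⟨hb, hcd⟩
        simpa using this

lemma pvDropWhile_eq (l : List Char) (h : List.IsChain pvR l) :
    l.dropWhile (· == '.') = if l.head? = some '.' then l.tail else l := by
  match l, h with
  | [], _ => simp
  | [c], _ =>
    by_cases hc : c = '.'
    · subst hc; simp [List.dropWhile]
    · simp [hc]
  | c :: d :: t, h =>
    by_cases hc : c = '.'
    · subst hc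
      have hd : ¬ d = '.' := by
        have := (List.isChain_cons_cons.mp h).1
        intro hd; exact this ⟨rfl, hd⟩
      simp [hd]
    · simp [hc]

lemma pvRstrip_eq (l : List Char) (h : List.IsChain pvR l) :
    (l.reverse.dropWhile (· == '.')).reverse = pvRstrip1 l := by
  have hrev : List.IsChain pvR l.reverse := by
    rw [List.isChain_reverse]
    exact h.imp (fun {a b} hab => by intro ⟨x, y⟩; exact hab ⟨y, x⟩)
  rw [pvDropWhile_eq _ hrev, List.head?_reverse, pvRstrip1]
  by_cases hl : l.getLast? = some '.'
  · rw [if_pos hl, if_pos hl]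
    have : l.reverse.tail.reverse = l.dropLast := by
      induction l using List.reverseRecOn <;> simp
    rw [this]
  · rw [if_neg hl, if_neg hl, List.reverse_reverse]

-- rstrip1 of a chain never ends in a dot
lemma pvRstrip1_last (l : List Char) (h : List.IsChain pvR l) :
    (pvRstrip1 l).getLast? ≠ some '.' := by
  induction l with
  | nil => simp [pvRstrip1]
  | cons c t ih =>
    cases t with
    | nil => by_cases hc : c = '.' <;> simp [pvRstrip1_cons, hc]
    | cons d u =>
      rw [pvRstrip1_cons, if_neg (by simp)]
      have ih' := ih h.tail
      cases hr : pvRstrip1 (d :: u) with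
      | nil =>
        rw [pvRstrip1_cons] at hr
        by_cases hu : u = []
        · subst hu
          rw [if_pos rfl] at hr
          have hd : d = '.' := by
            by_cases hd : d = '.'
            · exact hd
            · rw [if_neg hd] at hr; simp at hr
          have hcd := (List.isChain_cons_cons.mp h).1
          rw [hd] at hcd
          intro hc
          simp only [List.getLast?_singleton, Option.some.injEq] at hc
          exact hcd ⟨hc, rfl⟩
        · rw [if_neg hu] at hr; simp at hr
      | cons y ys =>
        rw [List.getLast?_cons_cons]
        rw [hr] at ih'
        exact ih'

-- padding: Python's while-loop equals ljust(3, last)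
lemma pvPad_eq (l : List Char) :
    (if l.length ≤ 2 then pvPadA 3 l else l)
      = l ++ List.replicate (3 - l.length) (l.getLastD ' ') := by
  match l with
  | [] => simp [pvPadA]
  | [c] => simp [pvPadA]
  | [c, d] => simp [pvPadA]
  | c :: d :: e :: t => simp

-- head of pvCol true is never a dot (restated from pvCol_chain for convenience)
lemma pvCol_true_head (l : List Char) : (pvCol true l).head? ≠ some '.' :=
  (pvCol_chain l true).2 rfl

-- rstrip1 preserves a non-dot head and nonemptiness
lemma pvRstrip1_head (l : List Char) (hne : l ≠ []) (hh : l.head? ≠ some '.') :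
    pvRstrip1 l ≠ [] ∧ (pvRstrip1 l).head? = l.head? := by
  cases l with
  | nil => exact absurd rfl hne
  | cons c t =>
    rw [pvRstrip1_cons]
    cases t with
    | nil =>
      have hc : ¬ c = '.' := by simpa using hh
      simp [hc]
    | cons y ys => simp

-- chain preserved by rstrip1 and take
lemma pvRstrip1_chain (l : List Char) (h : List.IsChain pvR l) :
    List.IsChain pvR (pvRstrip1 l) := by
  unfold pvRstrip1
  split
  · rw [List.dropLast_eq_take]; exact h.take _
  · exact h

-- dropping a leading dot from the uncollapsed-start form gives the collapsed-start form
lemma pvLstrip (k : List Char) :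
    (if (pvCol false k).head? = some '.' then (pvCol false k).tail else pvCol false k)
      = pvCol true k := by
  cases k with
  | nil => simp [pvCol]
  | cons c t =>
    by_cases hc : c = '.'
    · subst hc
      rw [show pvCol false ('.' :: t) = '.' :: pvCol true t from by
        rw [pvCol_cons_keep _ _ _ (by simp)]; simp]
      rw [pvCol_cons_skip _ _ _ ⟨rfl, rfl⟩]
      simp
    · have hcc : (c == '.') = false := by simp [hc]
      rw [show pvCol false (c :: t) = c :: pvCol false t from by
        rw [pvCol_cons_keep _ _ _ (by simp), hcc]]
      rw [pvCol_cons_keep _ _ _ (by simp [hc]), hcc]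
      simp [hc]

-- truncation + padding agree on a chain with no trailing dot
lemma pvTail (l : List Char) (hch : List.IsChain pvR l) (hlast : l.getLast? ≠ some '.') :
    (let a := if 15 < l.length then
         let x := l.take 15
         if x.getLast? = some '.' then x.take 14 else x
       else l
     if a.length ≤ 2 then pvPadA 3 a else a)
    = (let core := ((l.take 15).reverse.dropWhile (· == '.')).reverse
       core ++ List.replicate (3 - core.length) (core.getLastD ' ')) := by
  simp only [pvRstrip_eq _ (hch.take 15)]
  by_cases h15 : 15 < l.length
  · rw [if_pos h15]
    have hx : (l.take 15).take 14 = (l.take 15).dropLast := by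
      rw [List.dropLast_eq_take]
      have : (l.take 15).length = 15 := by simp; omega
      rw [this]
    rw [hx, show (if (l.take 15).getLast? = some '.' then (l.take 15).dropLast else l.take 15)
        = pvRstrip1 (l.take 15) from rfl]
    exact pvPad_eq _
  · rw [if_neg h15]
    have ht : l.take 15 = l := List.take_of_length_le (by omega)
    rw [ht, show pvRstrip1 l = l from by unfold pvRstrip1; rw [if_neg hlast]]
    exact pvPad_eq l

-- the whole post-processing agrees
lemma pvPost (k : List Char) :
    (let a := pvCol false k
     let a := if a.head? = some '.' then a.tail else a
     let a := if a.length = 0 then a ++ ['a'] else a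
     let a := if a.getLast? = some '.' then a.dropLast else a
     let a := if 15 < a.length then
         let x := a.take 15
         if x.getLast? = some '.' then x.take 14 else x
       else a
     if a.length ≤ 2 then pvPadA 3 a else a)
    = (let core := pvJoinDot ((pvSplitDot k).filter (· ≠ []))
       let core := if core = [] then ['a'] else core
       let core := ((core.take 15).reverse.dropWhile (· == '.')).reverse
       core ++ List.replicate (3 - core.length) (core.getLastD ' ')) := by
  have hB : pvJoinDot ((pvSplitDot k).filter (· ≠ [])) = pvRstrip1 (pvCol true k) := by
    rw [pvJoinDot_eq]; exact (pvKey k).1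
  simp only [hB, pvLstrip]
  have hchain : List.IsChain pvR (pvCol true k) := (pvCol_chain k true).1
  have hhead := pvCol_true_head k
  by_cases hE : pvCol true k = []
  · rw [hE]
    simp [pvRstrip1, pvPadA]
  · rw [if_neg (show ¬((pvCol true k).length = 0) by simpa using hE)]
    rw [show (if (pvCol true k).getLast? = some '.' then (pvCol true k).dropLast else pvCol true k)
        = pvRstrip1 (pvCol true k) from rfl]
    obtain ⟨hc0ne, hc0head⟩ := pvRstrip1_head _ hE hhead
    rw [if_neg hc0ne]
    exact pvTail _ (pvRstrip1_chain _ hchain) (pvRstrip1_last _ hchain)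

-- ===== VERDICT (by name: the statement is the Claim_ definition above) =====
theorem solution_spec : Claim_equal_solution := by
  intro new_id _ _
  unfold Spec_solution solution solution_alt
  simp only []
  rw [funext pvAllowed_eq]
  rw [pvFoldA_eq _ []]
  rw [List.nil_append]
  exact congrArg String.ofList (pvPost _)
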